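-- pv_equiv track=rewrite | github.com/FederatedAI/FATE | python/fate/arch/histogram/_histogram_distributed.py | _splits_into_k
-- ===== SOURCE A (Python) =====
-- def _splits_into_k(n, k: int):
--     d, r = divmod(n, k)
--     start = 0
--     for _ in range(k):
--         end = start + d + (r > 0)
--         yield start, end
--         start = end
--         r -= 1
-- ===== SOURCE B (Python) =====
-- def _splits_into_k(n, k: int):
--     d, r = divmod(n, k)
--     for i in range(k):
--         yield i * d + min(i, r), (i + 1) * d + min(i + 1, r)
-- ===== Notes on version B (the rewrite author's own statement) =====
-- stated objective: alternative
-- what changed: B computes both boundaries of each range in closed form from the index (i*d + min(i, r)), removing A's carried running start and decremented remainder.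
import Mathlib
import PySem

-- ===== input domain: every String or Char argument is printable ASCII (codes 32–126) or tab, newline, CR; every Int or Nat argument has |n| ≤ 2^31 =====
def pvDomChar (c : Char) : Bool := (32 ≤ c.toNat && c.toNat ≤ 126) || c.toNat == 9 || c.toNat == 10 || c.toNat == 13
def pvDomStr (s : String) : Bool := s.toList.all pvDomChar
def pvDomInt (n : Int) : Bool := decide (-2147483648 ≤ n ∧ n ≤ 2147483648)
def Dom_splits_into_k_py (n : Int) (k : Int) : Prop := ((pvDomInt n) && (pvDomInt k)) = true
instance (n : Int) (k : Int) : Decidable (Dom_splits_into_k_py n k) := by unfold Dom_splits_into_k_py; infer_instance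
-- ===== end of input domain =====

-- B replaces A's threaded running start/remainder with a per-index closed form; alternative (same cost), return value only (A is a generator, here materialised as a list).

-- ===== PORT A =====
-- d, r = divmod(n, k); start = 0; for _ in range(k): end = start+d+(r>0); yield (start,end); start = end; r -= 1
-- (k = 0 raises ZeroDivisionError in Python; excluded by Pre_, so divmod is ported total via floordiv/mod)
def splits_into_k_py (n : Int) (k : Int) : List (Int × Int) :=
  let d := PySem.Int.floordiv n k
  let r := PySem.Int.mod n k
  -- the yielded pairs are accumulated in front (cons) and reversed at the end
  (((PySem.List.pyRange 0 k 1).foldl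
      (fun (st : List (Int × Int) × Int × Int) _ =>
        let acc := st.1
        let start := st.2.1
        let r := st.2.2
        let e := start + d + (if r > 0 then 1 else 0)
        ((start, e) :: acc, e, r - 1))
      ([], 0, r))).1.reverse

-- ===== PORT B =====
-- d, r = divmod(n, k); for i in range(k): yield (i*d + min(i, r), (i+1)*d + min(i+1, r))
-- (same divmod; k = 0 excluded by Pre_)
def splits_into_k_py_alt (n : Int) (k : Int) : List (Int × Int) :=
  let d := PySem.Int.floordiv n k
  let r := PySem.Int.mod n k
  (PySem.List.pyRange 0 k 1).map (fun i => (i * d + min i r, (i + 1) * d + min (i + 1) r))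

-- ===== PRECONDITION & SPEC =====
-- Pre_ excludes exactly k = 0, where Python's divmod raises ZeroDivisionError.
def Pre_splits_into_k_py (n : Int) (k : Int) : Prop := k ≠ 0
instance (n : Int) (k : Int) : Decidable (Pre_splits_into_k_py n k) := by unfold Pre_splits_into_k_py; infer_instance
def pvWitness_splits_into_k_py : Int × Int := (10, 3)

def Spec_splits_into_k_py (n : Int) (k : Int) (out : List (Int × Int)) : Prop := out = splits_into_k_py_alt n k
instance (n : Int) (k : Int) (out : List (Int × Int)) : Decidable (Spec_splits_into_k_py n k out) := by unfold Spec_splits_into_k_py; infer_instance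

-- ===== CLAIM (what is proved, stated in full; the proofs are below) =====
def Claim_equal_splits_into_k_py : Prop := ∀ (n : Int) (k : Int), Dom_splits_into_k_py n k → Pre_splits_into_k_py n k → Spec_splits_into_k_py n k (splits_into_k_py n k)

-- ===== LEMMAS AND PROOFS =====

-- Loop invariant: folding A's body over range(a, b) from start = a*d + min a r and
-- remainder r - a appends exactly B's closed-form pairs for indices a..b-1.
theorem splits_loop_eq (d r : Int) :
    ∀ (m : Nat) (a b : Int), (b - a).toNat = m →
    ∀ (acc : List (Int × Int)),
    ((PySem.List.pyRange a b 1).foldl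
        (fun (st : List (Int × Int) × Int × Int) _ =>
          let acc := st.1
          let start := st.2.1
          let r := st.2.2
          let e := start + d + (if r > 0 then 1 else 0)
          ((start, e) :: acc, e, r - 1))
        (acc, a * d + min a r, r - a)).1
      = ((PySem.List.pyRange a b 1).map
          (fun i => (i * d + min i r, (i + 1) * d + min (i + 1) r))).reverse ++ acc := by
  intro m
  induction m with
  | zero =>
    intro a b h acc
    rw [PySem.List.pyRange_one_eq_nil (by omega)]
    simp
  | succ m ih =>
    intro a b h acc
    rw [PySem.List.pyRange_one_cons (by omega)]
    simp only [List.foldl_cons, List.map_cons]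
    have he : a * d + min a r + d + (if r - a > 0 then 1 else 0)
        = (a + 1) * d + min (a + 1) r := by
      by_cases hc : r ≤ a
      · rw [min_eq_right hc, min_eq_right (by omega), if_neg (by omega)]; ring
      · rw [min_eq_left (by omega), min_eq_left (by omega), if_pos (by omega)]; ring
    have hrec := ih (a + 1) b (by omega) ((a * d + min a r, (a + 1) * d + min (a + 1) r) :: acc)
    simp only [he, show r - a - 1 = r - (a + 1) by ring] at *
    rw [hrec]
    simp

-- ===== VERDICT (by name: the statement is the Claim_ definition above) =====
theorem splits_into_k_py_spec : Claim_equal_splits_into_k_py := by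
  intro n k _ hk
  unfold Spec_splits_into_k_py splits_into_k_py splits_into_k_py_alt
  by_cases hle : k ≤ 0
  · rw [PySem.List.pyRange_one_eq_nil (by omega)]; simp
  · have hr : 0 ≤ PySem.Int.mod n k := PySem.Int.mod_nonneg n (show 0 < k by omega)
    have h0 : min (0 : Int) (PySem.Int.mod n k) = 0 := by omega
    have h := splits_loop_eq (PySem.Int.floordiv n k) (PySem.Int.mod n k)
      (k - 0).toNat 0 k rfl []
    simp only [h0, zero_mul, zero_add, Int.sub_zero, List.append_nil] at h
    exact Eq.trans (congrArg List.reverse h) (List.reverse_reverse _)
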